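-- pv_equiv track=rewrite | github.com/SamuelSchlesinger/erdos-problems | scripts/gadget_mine.py | families_are_disjoint
-- ===== SOURCE A (Python) =====
-- def families_are_disjoint(families):
--     """Return True if no element appears in two different families."""
--     seen = set()
--     for fam in families:
--         s = set(fam)
--         if seen & s:
--             return False
--         seen |= s
--     return True
-- ===== SOURCE B (Python) =====
-- def families_are_disjoint(families):
--     """Return True if no element appears in two different families."""
--     counts = {}
--     for fam in families:
--         for x in set(fam):
--             counts[x] = counts.get(x, 0) + 1
--     return all(v == 1 for v in counts.values())
-- ===== Notes on version B (the rewrite author's own statement) =====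
-- stated objective: alternative
-- what changed: Replaces A's running seen-set with intersection test and early return by a count-then-check decomposition: one pass builds a per-element family-count dict (deduping within each family), then B returns whether every count is 1.
import Mathlib
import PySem

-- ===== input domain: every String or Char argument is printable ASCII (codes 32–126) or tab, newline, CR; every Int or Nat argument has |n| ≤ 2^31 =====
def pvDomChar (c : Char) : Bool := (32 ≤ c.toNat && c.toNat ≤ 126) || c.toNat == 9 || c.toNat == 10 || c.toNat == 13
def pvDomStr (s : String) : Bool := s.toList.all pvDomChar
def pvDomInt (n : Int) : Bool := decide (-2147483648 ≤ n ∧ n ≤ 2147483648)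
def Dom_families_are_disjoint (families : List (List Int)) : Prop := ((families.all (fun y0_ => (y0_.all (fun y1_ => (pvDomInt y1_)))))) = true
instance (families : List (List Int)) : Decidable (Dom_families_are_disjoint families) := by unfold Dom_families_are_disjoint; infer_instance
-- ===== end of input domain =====

-- B differs from A by decomposition only (count per element, then check all counts are 1); same asymptotic cost.

-- ===== PORT A =====
-- the loop 'for fam in families: …' with the running 'seen' set and early return False
def famDisjGoA (seen : PySem.Set Int) : List (List Int) → Bool
  | [] => true
  | fam :: rest =>
    let s := PySem.Set.ofList fam
    if PySem.Set.inter seen s ≠ ([] : List Int) then false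
    else famDisjGoA (PySem.Set.union seen s) rest

def families_are_disjoint (families : List (List Int)) : Bool :=
  famDisjGoA PySem.Set.empty families

-- ===== PORT B =====
-- one pass building counts[x] = counts.get(x,0)+1 over set(fam), then all(v == 1 for v in counts.values())
def families_are_disjoint_alt (families : List (List Int)) : Bool :=
  let counts := families.foldl
    (fun d fam => (PySem.Set.ofList fam).foldl
      (fun d x => d.insert x (d.getD x 0 + 1)) d)
    PySem.Dict.empty
  counts.values.all (fun v => v == (1 : Int))

-- ===== PRECONDITION & SPEC =====
def Spec_families_are_disjoint (families : List (List Int)) (out : Bool) : Prop := out = families_are_disjoint_alt families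
instance (families : List (List Int)) (out : Bool) : Decidable (Spec_families_are_disjoint families out) := by unfold Spec_families_are_disjoint; infer_instance

-- ===== CLAIM (what is proved, stated in full; the proofs are below) =====
def Claim_equal_families_are_disjoint : Prop := ∀ (families : List (List Int)), Dom_families_are_disjoint families → Spec_families_are_disjoint families (families_are_disjoint families)

-- ===== LEMMAS AND PROOFS =====

-- abbreviation for B's counting step (the body of B's outer loop)
def famStep (d : PySem.Dict Int Int) (fam : List Int) : PySem.Dict Int Int :=
  (PySem.Set.ofList fam).foldl (fun d x => d.insert x (d.getD x 0 + 1)) d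

lemma famStep_getD (d : PySem.Dict Int Int) (fam : List Int) (v : Int) :
    (famStep d fam).getD v 0 = d.getD v 0 + ((PySem.Set.ofList fam).count v : Int) := by
  simp [famStep, PySem.Dict.getD_foldl_insert_add_one]

lemma famStep_keys (d : PySem.Dict Int Int) (fam : List Int) :
    (famStep d fam).keys = PySem.Set.update d.keys (PySem.Set.ofList fam) := by
  simp [famStep, PySem.Dict.keys_foldl_insert]

lemma famStep_nodup (d : PySem.Dict Int Int) (fam : List Int) (h : d.keys.Nodup) :
    (famStep d fam).keys.Nodup := by
  rw [famStep_keys]; exact PySem.Set.nodup_update _ _ h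

lemma foldl_famStep_mono (fams : List (List Int)) (d : PySem.Dict Int Int) (v : Int) :
    d.getD v 0 ≤ (fams.foldl famStep d).getD v 0 := by
  induction fams generalizing d with
  | nil => simp
  | cons fam rest ih =>
    refine le_trans ?_ (ih (famStep d fam))
    rw [famStep_getD]
    have h0 : (0 : Int) ≤ ((PySem.Set.ofList fam).count v : Int) := Int.natCast_nonneg _
    omega

lemma foldl_famStep_nodup (fams : List (List Int)) (d : PySem.Dict Int Int)
    (h : d.keys.Nodup) : (fams.foldl famStep d).keys.Nodup := by
  induction fams generalizing d with
  | nil => simpa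
  | cons fam rest ih => exact ih (famStep d fam) (famStep_nodup d fam h)

lemma inter_eq_nil_iff (s t : PySem.Set Int) :
    PySem.Set.inter s t = ([] : List Int) ↔ ∀ x ∈ s, x ∉ t := by
  constructor
  · intro h x hxs hxt
    have : x ∈ PySem.Set.inter s t := (PySem.Set.mem_inter s t x).mpr ⟨hxs, hxt⟩
    simp [h] at this
  · intro h
    rcases hne : PySem.Set.inter s t with _ | ⟨x, tl⟩
    · rfl
    · have hx : x ∈ PySem.Set.inter s t := by rw [hne]; exact List.mem_cons_self
      have := (PySem.Set.mem_inter s t x).mp hx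
      exact absurd this.2 (h x this.1)

-- the main invariant: A's remaining loop equals B's check of the final counter,
-- given that d counts exactly the elements of seen, each once
lemma main_inv (fams : List (List Int)) (seen : PySem.Set Int) (d : PySem.Dict Int Int)
    (hnd : d.keys.Nodup)
    (hmem : ∀ k, k ∈ d.keys ↔ k ∈ seen)
    (hval : ∀ k ∈ d.keys, d.getD k 0 = 1) :
    famDisjGoA seen fams = (fams.foldl famStep d).values.all (fun v => v == (1 : Int)) := by
  induction fams generalizing seen d with
  | nil =>
    simp only [famDisjGoA, List.foldl_nil]
    rw [PySem.Dict.values_eq_map_keys d hnd 0]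
    symm
    simp only [List.all_eq_true, List.mem_map]
    rintro v ⟨k, hk, rfl⟩
    simp [hval k hk]
  | cons fam rest ih =>
    simp only [famDisjGoA, List.foldl_cons]
    by_cases hcl : PySem.Set.inter seen (PySem.Set.ofList fam) = ([] : List Int)
    · -- no clash: recurse with updated seen / counter
      rw [if_neg (by simp [hcl])]
      refine ih (PySem.Set.union seen (PySem.Set.ofList fam)) (famStep d fam)
        (famStep_nodup d fam hnd) ?_ ?_
      · intro k
        rw [famStep_keys, PySem.Set.mem_update, PySem.Set.mem_union, hmem]
      · intro k hk
        rw [famStep_keys, PySem.Set.mem_update] at hk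
        rw [famStep_getD]
        have hdisj := (inter_eq_nil_iff _ _).mp hcl
        by_cases hf : k ∈ PySem.Set.ofList fam
        · have hks : k ∉ seen := fun h => hdisj k h hf
          have hz : d.getD k 0 = 0 := by
            apply PySem.Dict.getD_of_not_contains
            rw [Bool.eq_false_iff]
            intro hc
            exact hks ((hmem k).mp ((PySem.Dict.contains_iff_mem_keys d k).mp hc))
          rw [hz, List.count_eq_one_of_mem (PySem.Set.nodup_ofList _) hf]
          simp
        · rcases hk with hk | hk
          · rw [hval k hk, List.count_eq_zero_of_not_mem hf]
            simp
          · exact absurd hk hf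
    · -- clash: A returns False; the clashing element's final count is ≥ 2
      rw [if_pos (by simp [hcl])]
      obtain ⟨x, hx⟩ := List.exists_mem_of_ne_nil _ hcl
      have hxs := (PySem.Set.mem_inter _ _ x).mp hx
      have h2 : (2 : Int) ≤ (rest.foldl famStep (famStep d fam)).getD x 0 := by
        refine le_trans ?_ (foldl_famStep_mono rest (famStep d fam) x)
        rw [famStep_getD, hval x ((hmem x).mpr hxs.1),
            List.count_eq_one_of_mem (PySem.Set.nodup_ofList _) hxs.2]
        simp
      have hndD : (rest.foldl famStep (famStep d fam)).keys.Nodup :=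
        foldl_famStep_nodup rest _ (famStep_nodup d fam hnd)
      have hxk : x ∈ (rest.foldl famStep (famStep d fam)).keys := by
        by_contra hxk
        have hz : (rest.foldl famStep (famStep d fam)).getD x 0 = 0 := by
          apply PySem.Dict.getD_of_not_contains
          rw [Bool.eq_false_iff]
          intro hc
          exact hxk ((PySem.Dict.contains_iff_mem_keys _ x).mp hc)
        omega
      symm
      rw [PySem.Dict.values_eq_map_keys _ hndD 0]
      rw [List.all_eq_false]
      refine ⟨(rest.foldl famStep (famStep d fam)).getD x 0, List.mem_map.mpr ⟨x, hxk, rfl⟩, ?_⟩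
      simp only [beq_iff_eq]
      omega

-- ===== VERDICT (by name: the statement is the Claim_ definition above) =====
theorem families_are_disjoint_spec : Claim_equal_families_are_disjoint := by
  intro families _
  unfold Spec_families_are_disjoint families_are_disjoint families_are_disjoint_alt
  rw [main_inv families PySem.Set.empty PySem.Dict.empty (by simp) (by simp [PySem.Set.empty]) (by simp)]
  rfl
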